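-- pv_equiv track=rewrite | github.com/m1594730237/FastAndConstrainedKeyphrase | model/src/biunilm/get_score_merged.py | remove_mask
-- ===== SOURCE A (Python) =====
-- def find_sublist(x, y):
--     l1, l2 = len(x), len(y)
--     for i in range(l1):
--         if x[i:min(i + l2, l1)] == y:
--             return i
--     return -1
--
-- def remove_mask(line, mask_num, total_mask_num):
--     loop = 0
--     line = line.copy()
--     while loop < len(line):
--         if line[loop] == "[MASK]" and find_sublist(line[:loop + 1], ["other", "phrases", "are"]) == -1:
--             line = line[:loop + mask_num] + line[loop + total_mask_num:]
--             loop += mask_num - 1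
--         loop += 1
--     return line
-- ===== SOURCE B (Python) =====
-- SENT = ["other", "phrases", "are"]
--
-- def remove_mask(line, mask_num, total_mask_num):
--     out = []
--     seen = False  # sentinel phrase already occurs in out
--     step = max(1, total_mask_num)  # guard keeps the scan advancing
--     i, n = 0, len(line)
--     while i < n:
--         if seen:
--             # every remaining token is kept verbatim
--             out.extend(line[i:])
--             break
--         try:
--             j = line.index("[MASK]", i)
--         except ValueError:
--             out.extend(line[i:])
--             break
--         # plain tokens before the next mask, tracking the sentinel incrementally
--         for tok in line[i:j]:
--             out.append(tok)
--             if not seen and tok == "are" and out[-3:] == SENT: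
--                 seen = True
--         if seen:
--             out.extend(line[j:])
--             break
--         # keep mask_num tokens starting at the mask, skip to j + total_mask_num
--         for tok in line[j:j + mask_num]:
--             out.append(tok)
--             if not seen and tok == "are" and out[-3:] == SENT:
--                 seen = True
--         i = j + step
--     return out
-- ===== Notes on version B (the rewrite author's own statement) =====
-- stated objective: faster
-- what changed: Single left-to-right pass that jumps between [MASK]s with list.index, keeps an incremental 'sentinel phrase seen' flag (checking only the last three appended tokens) and bulk-copies the mask-free remainder with extend, instead of re-scanning the whole prefix with find_sublist at every [MASK] and rebuilding the list by slicing.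
-- outside the precondition, e.g. on remove_mask(['[MASK]'], 2, -3): A returns ['[MASK]', '[MASK]'], B returns ['[MASK]']; on remove_mask(['x', '[MASK]', 'phrases'], -3, 3): A raises IndexError, B returns ['x']
import Mathlib
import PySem

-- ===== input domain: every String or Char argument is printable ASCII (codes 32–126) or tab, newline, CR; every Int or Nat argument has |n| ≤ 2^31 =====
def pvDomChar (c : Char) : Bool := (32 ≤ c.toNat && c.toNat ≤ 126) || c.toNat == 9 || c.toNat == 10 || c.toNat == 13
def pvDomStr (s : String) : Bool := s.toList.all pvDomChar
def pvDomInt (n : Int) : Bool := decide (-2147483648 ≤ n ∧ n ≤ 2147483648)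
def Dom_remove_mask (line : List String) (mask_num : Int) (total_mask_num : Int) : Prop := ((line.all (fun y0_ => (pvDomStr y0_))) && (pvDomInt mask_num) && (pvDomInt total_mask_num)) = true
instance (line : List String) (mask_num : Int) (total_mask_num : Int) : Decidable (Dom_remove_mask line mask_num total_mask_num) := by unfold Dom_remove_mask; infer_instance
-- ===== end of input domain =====

-- B makes one left-to-right pass that jumps from mask to mask (list.index) with an incremental
-- 'sentinel phrase seen' flag and bulk-copies mask-free tails, instead of A's rescan of the whole
-- prefix at every mask; equal on Pre_ (the intended parameter regime, or lines A only copies).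

-- the sentinel phrase ["other", "phrases", "are"]
def pvSent : List String := ["other", "phrases", "are"]

-- ===== PORT A =====
-- for i in range(l1): if x[i:min(i+l2,l1)] == y: return i / return -1
def findSubGo (x y : List String) (i : Nat) : Int :=
  if i < x.length then
    (if PySem.List.slice x (some (i : Int)) (some (min ((i : Int) + (y.length : Int)) (x.length : Int))) = y
     then (i : Int)
     else findSubGo x y (i + 1))
  else -1
termination_by x.length - i

def find_sublist (x y : List String) : Int := findSubGo x y 0

-- the while-loop of A; fuel only makes the recursion total (inside Pre_, line.length + 1 suffices)
def removeMaskGo (m t : Int) : Nat → List String → Int → List String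
  | 0, line, _ => line
  | fuel + 1, line, loop =>
    if loop < (line.length : Int) then
      (if PySem.List.pyGetD line loop "" = "[MASK]"
          ∧ find_sublist (PySem.List.slice line none (some (loop + 1))) pvSent = -1 then
        removeMaskGo m t fuel
          (PySem.List.slice line none (some (loop + m)) ++ PySem.List.slice line (some (loop + t)) none)
          (loop + (m - 1) + 1)
      else removeMaskGo m t fuel line (loop + 1))
    else line

def remove_mask (line : List String) (mask_num : Int) (total_mask_num : Int) : List String :=
  removeMaskGo mask_num total_mask_num (line.length + 1) line 0

-- ===== PORT B =====
-- out.append(tok); if not seen and out[-3:] == SENT: seen = True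
def pvPush (out : List String) (seen : Bool) (tok : String) : List String × Bool :=
  let out' := out ++ [tok]
  (out', seen || (decide (tok = "are") && decide (PySem.List.slice out' (some (-3)) none = pvSent)))

-- line.index(v, k): first index ≥ k holding v (none = ValueError)
def idxFrom (xs : List String) (v : String) (k : Nat) : Option Nat :=
  if h : k < xs.length then
    (if xs[k] = v then some k else idxFrom xs v (k + 1))
  else none
termination_by xs.length - k

-- needed by removeMaskAltGo's termination proof
theorem idxFrom_ge (xs : List String) (v : String) :
    ∀ (k j : Nat), idxFrom xs v k = some j → k ≤ j := by
  have key : ∀ (d k j : Nat), xs.length - k ≤ d → idxFrom xs v k = some j → k ≤ j := by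
    intro d
    induction d with
    | zero =>
      intro k j hd h
      rw [idxFrom] at h
      split at h
      · omega
      · simp at h
    | succ d ihd =>
      intro k j hd h
      rw [idxFrom] at h
      split at h
      · split at h
        · cases h; omega
        · have := ihd (k + 1) j (by omega) h; omega
      · simp at h
  exact fun k j h => key (xs.length - k) k j (le_refl _) h

def removeMaskAltGo (xs : List String) (m t : Int) (i : Nat) (out : List String) (seen : Bool) : List String :=
  if _h : i < xs.length then
    (if seen then out ++ PySem.List.slice xs (some (i : Int)) none
    else
      match _hj : idxFrom xs "[MASK]" i with
      | none => out ++ PySem.List.slice xs (some (i : Int)) none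
      | some j =>
        let p := (PySem.List.slice xs (some (i : Int)) (some (j : Int))).foldl
                   (fun q tok => pvPush q.1 q.2 tok) (out, seen)
        if p.2 then p.1 ++ PySem.List.slice xs (some (j : Int)) none
        else
          let p2 := (PySem.List.slice xs (some (j : Int)) (some ((j : Int) + m))).foldl
                      (fun q tok => pvPush q.1 q.2 tok) p
          removeMaskAltGo xs m t (j + max 1 t.toNat) p2.1 p2.2)
  else out
termination_by xs.length - i
decreasing_by
  have h1 := idxFrom_ge xs "[MASK]" i j _hj
  have h2 := Nat.le_max_left 1 t.toNat
  omega

def remove_mask_alt (line : List String) (mask_num : Int) (total_mask_num : Int) : List String :=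
  removeMaskAltGo line mask_num total_mask_num 0 [] false

-- ===== PRECONDITION & SPEC =====
-- Pre_ excludes inputs that contain "[MASK]" while mask_num < 0, total_mask_num < mask_num or
-- total_mask_num < 1 — outside the keep-mask_num-of-total_mask_num regime — where A can loop
-- forever, raise IndexError through a wrapped negative index, or return a list stitched from
-- overlapping wrapped slices.
def Pre_remove_mask (line : List String) (mask_num : Int) (total_mask_num : Int) : Prop :=
  ¬ "[MASK]" ∈ line ∨ (0 ≤ mask_num ∧ mask_num ≤ total_mask_num ∧ 1 ≤ total_mask_num)

instance (line : List String) (mask_num : Int) (total_mask_num : Int) : Decidable (Pre_remove_mask line mask_num total_mask_num) := by unfold Pre_remove_mask; infer_instance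

def pvWitness_remove_mask : List String × Int × Int := (["other", "phrases", "are", "[MASK]", "x"], 1, 3)

def Spec_remove_mask (line : List String) (mask_num : Int) (total_mask_num : Int) (out : List String) : Prop := out = remove_mask_alt line mask_num total_mask_num
instance (line : List String) (mask_num : Int) (total_mask_num : Int) (out : List String) : Decidable (Spec_remove_mask line mask_num total_mask_num out) := by unfold Spec_remove_mask; infer_instance

-- ===== CLAIM (what is proved, stated in full; the proofs are below) =====
def Claim_equal_remove_mask : Prop := ∀ (line : List String) (mask_num : Int) (total_mask_num : Int), Dom_remove_mask line mask_num total_mask_num → Pre_remove_mask line mask_num total_mask_num → Spec_remove_mask line mask_num total_mask_num (remove_mask line mask_num total_mask_num)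

-- ===== LEMMAS AND PROOFS =====

-- 'the sentinel phrase occurs as a contiguous sublist' as a structural scan
def hasSent : List String → Bool
  | [] => false
  | a :: l => decide ((a :: l).take 3 = pvSent) || hasSent l

theorem slice_take_three (x : List String) (i : Nat) (h : i < x.length) :
    PySem.List.slice x (some (i : Int)) (some (min ((i : Int) + (pvSent.length : Int)) (x.length : Int)))
      = (x.drop i).take 3 := by
  have hmin : min ((i : Int) + (pvSent.length : Int)) (x.length : Int)
      = ((min (i + 3) x.length : Nat) : Int) := by
    simp [pvSent]
  rw [hmin, PySem.List.slice_natCast]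
  have : min (i + 3) x.length - i = min 3 (x.length - i) := by omega
  rw [this]
  rw [List.take_eq_take_iff]
  simp

theorem findSubGo_eq_neg_one (x : List String) (i : Nat) :
    findSubGo x pvSent i = -1 ↔ hasSent (x.drop i) = false := by
  have key : ∀ (n j : Nat), x.length - j ≤ n →
      (findSubGo x pvSent j = -1 ↔ hasSent (x.drop j) = false) := by
    intro n
    induction n with
    | zero =>
      intro j hj
      have hj' : x.length ≤ j := by omega
      rw [findSubGo, if_neg (by omega), List.drop_eq_nil_of_le hj']
      simp [hasSent]
    | succ n ih =>
      intro j hj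
      by_cases h : j < x.length
      · rw [findSubGo, if_pos h, slice_take_three x j h]
        rw [List.drop_eq_getElem_cons h]
        rw [show hasSent (x[j] :: x.drop (j + 1))
              = (decide ((x[j] :: x.drop (j + 1)).take 3 = pvSent) || hasSent (x.drop (j + 1))) from rfl]
        rw [← List.drop_eq_getElem_cons h]
        by_cases hc : (x.drop j).take 3 = pvSent
        · rw [if_pos hc]
          constructor
          · intro habs; omega
          · intro habs; simp [hc] at habs
        · rw [if_neg hc]
          rw [ih (j + 1) (by omega)]
          simp [hc]
      · rw [findSubGo, if_neg h, List.drop_eq_nil_of_le (by omega)]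
        simp [hasSent]
  exact key (x.length - i) i (le_refl _)

theorem hasSent_append (l : List String) (x : String) :
    hasSent (l ++ [x])
      = (hasSent l || decide ((l ++ [x]).drop (l.length + 1 - 3) = pvSent)) := by
  induction l with
  | nil => simp [hasSent, pvSent]
  | cons a l ih =>
    match l with
    | [] => simp [hasSent, pvSent]
    | [b] => simp [hasSent, pvSent, Bool.or_comm]
    | b :: c :: l' =>
      show hasSent (a :: ((b :: c :: l') ++ [x])) = _
      rw [hasSent]
      rw [ih]
      rw [show hasSent (a :: b :: c :: l')
            = (decide ((a :: b :: c :: l').take 3 = pvSent) || hasSent (b :: c :: l')) from rfl]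
      simp only [List.take_succ_cons, List.cons_append, List.length_cons]
      have h1 : l'.length + 1 + 1 + 1 + 1 - 3 = l'.length + 1 := by omega
      have h2 : l'.length + 1 + 1 + 1 - 3 = l'.length := by omega
      simp only [h1, h2, List.drop_succ_cons, List.take_zero]
      ac_rfl

theorem hasSent_append_mask (l : List String) :
    hasSent (l ++ ["[MASK]"]) = hasSent l := by
  rw [hasSent_append]
  have : ¬ (l ++ ["[MASK]"]).drop (l.length + 1 - 3) = pvSent := by
    intro h
    have hsuf : pvSent <:+ (l ++ ["[MASK]"]) := h ▸ List.drop_suffix _ _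
    rcases hsuf with ⟨s, hs⟩
    have : (s ++ pvSent).getLast? = (l ++ ["[MASK]"]).getLast? := by rw [hs]
    rw [show s ++ pvSent = (s ++ ["other", "phrases"]) ++ ["are"] by simp [pvSent]] at this
    simp at this
  simp only [show l.length + 1 - 3 = l.length - 2 from by omega] at this
  simp [this]

theorem window_last (l : List String) (x : String) (k : Nat)
    (h : (l ++ [x]).drop k = pvSent) : x = "are" := by
  have hsuf : pvSent <:+ (l ++ [x]) := h ▸ List.drop_suffix _ _
  rcases hsuf with ⟨s, hs⟩
  have : (s ++ pvSent).getLast? = (l ++ [x]).getLast? := by rw [hs]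
  rw [show s ++ pvSent = (s ++ ["other", "phrases"]) ++ ["are"] by simp [pvSent]] at this
  simpa using this.symm

theorem pvPush_correct (out : List String) (tok : String) :
    pvPush out (hasSent out) tok = (out ++ [tok], hasSent (out ++ [tok])) := by
  have hs := PySem.List.slice_from_neg_ofNat (out ++ [tok]) 3 (by omega)
  simp only [pvPush, hs, hasSent_append]
  by_cases hD : (out ++ [tok]).drop (out.length - 2) = pvSent
  · have htok : tok = "are" := window_last out tok _ hD
    simp [htok]
  · simp [hD]

theorem foldl_pvPush (ys out : List String) :
    ys.foldl (fun q tok => pvPush q.1 q.2 tok) (out, hasSent out)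
      = (out ++ ys, hasSent (out ++ ys)) := by
  induction ys generalizing out with
  | nil => simp
  | cons y ys ih =>
    simp only [List.foldl_cons]
    rw [pvPush_correct, ih]
    simp



theorem cond_iff (out : List String) (x : String) :
    (find_sublist (out ++ [x]) pvSent = -1) ↔ (hasSent (out ++ [x]) = false) := by
  simpa [find_sublist] using findSubGo_eq_neg_one (out ++ [x]) 0

theorem hasSent_mono (l r : List String) (h : hasSent l = true) : hasSent (l ++ r) = true := by
  induction r using List.reverseRecOn with
  | nil => simpa using h
  | append_singleton r x ih => rw [← List.append_assoc, hasSent_append, ih]; simp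

theorem pyGetD_at (out xs : List String) (i : Nat) (hi : i < xs.length) :
    PySem.List.pyGetD (out ++ xs.drop i) ((out.length : Nat) : Int) "" = xs[i] := by
  rw [PySem.List.pyGetD_natCast, List.drop_eq_getElem_cons hi]
  simp [List.getD, List.getElem?_append_right]
  simp [List.getElem?_eq_getElem hi]

theorem slice_prefix1 (out xs : List String) (i : Nat) (hi : i < xs.length) :
    PySem.List.slice (out ++ xs.drop i) none (some ((out.length : Int) + 1))
      = out ++ [xs[i]] := by
  rw [show (out.length : Int) + 1 = ((out.length + 1 : Nat) : Int) from by push_cast; ring]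
  rw [PySem.List.slice_to_natCast, List.drop_eq_getElem_cons hi, List.take_append]
  simp [List.take_of_length_le (by omega : out.length ≤ out.length + 1)]
  rw [List.drop_eq_getElem_cons hi]
  rfl

theorem idxFrom_none_spec (xs : List String) (v : String) :
    ∀ (k : Nat), idxFrom xs v k = none →
      ∀ (j : Nat) (hj : j < xs.length), k ≤ j → xs[j] ≠ v := by
  have key : ∀ (d k : Nat), xs.length - k ≤ d → idxFrom xs v k = none →
      ∀ (j : Nat) (hj : j < xs.length), k ≤ j → xs[j] ≠ v := by
    intro d
    induction d with
    | zero => intro k hd _ j hj hkj; omega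
    | succ d ihd =>
      intro k hd h j hj hkj
      rw [idxFrom] at h
      split at h
      · split at h
        · cases h
        · rename_i hkv
          by_cases hjk : j = k
          · subst hjk; exact hkv
          · exact ihd (k + 1) (by omega) h j hj (by omega)
      · omega
  exact fun k h => key (xs.length - k) k (le_refl _) h

theorem idxFrom_some_spec (xs : List String) (v : String) :
    ∀ (k j : Nat), idxFrom xs v k = some j →
      j < xs.length ∧ xs[j]? = some v ∧
        ∀ (l : Nat) (hl : l < xs.length), k ≤ l → l < j → xs[l] ≠ v := by
  have key : ∀ (d k j : Nat), xs.length - k ≤ d → idxFrom xs v k = some j →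
      j < xs.length ∧ xs[j]? = some v ∧
        ∀ (l : Nat) (hl : l < xs.length), k ≤ l → l < j → xs[l] ≠ v := by
    intro d
    induction d with
    | zero =>
      intro k j hd h
      rw [idxFrom] at h
      split at h
      · omega
      · simp at h
    | succ d ihd =>
      intro k j hd h
      rw [idxFrom] at h
      split at h
      · rename_i hk
        split at h
        · rename_i hv
          cases h
          exact ⟨hk, by simp [List.getElem?_eq_getElem hk, hv], fun l hl h1 h2 => by omega⟩
        · rename_i hv
          obtain ⟨h1, h2, h3⟩ := ihd (k + 1) j (by omega) h
          have hkj := idxFrom_ge xs v (k + 1) j h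
          refine ⟨h1, h2, fun l hl hkl hlj => ?_⟩
          by_cases hlk : l = k
          · subst hlk; exact hv
          · exact h3 l hl (by omega) hlj
      · simp at h
  exact fun k j h => key (xs.length - k) k j (le_refl _) h

theorem idxFrom_shift (xs : List String) (v : String) (i j : Nat)
    (h : idxFrom xs v i = some j) (hij : i < j) : idxFrom xs v (i + 1) = some j := by
  rw [idxFrom] at h
  split at h
  · split at h
    · cases h; omega
    · exact h
  · simp at h

-- a value of B's loop in each of its three configurations
theorem B_val_seen (xs : List String) (m t : Int) (i : Nat) (out : List String)
    (hi : i < xs.length) (hseen : hasSent out = true) :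
    removeMaskAltGo xs m t i out (hasSent out) = out ++ xs.drop i := by
  rw [removeMaskAltGo, dif_pos hi, if_pos hseen, PySem.List.slice_from_natCast]

theorem B_val_none (xs : List String) (m t : Int) (i : Nat) (out : List String)
    (hi : i < xs.length) (hseen : hasSent out = false)
    (hidx : idxFrom xs "[MASK]" i = none) :
    removeMaskAltGo xs m t i out (hasSent out) = out ++ xs.drop i := by
  rw [removeMaskAltGo, dif_pos hi, if_neg (by simp [hseen])]
  split
  · rw [PySem.List.slice_from_natCast]
  · rename_i j h; rw [hidx] at h; cases h

theorem B_val_some (xs : List String) (m t : Int) (i j : Nat) (out : List String)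
    (hi : i < xs.length) (hseen : hasSent out = false)
    (hidx : idxFrom xs "[MASK]" i = some j) :
    removeMaskAltGo xs m t i out (hasSent out)
      = (if hasSent (out ++ (xs.drop i).take (j - i)) = true
          then (out ++ (xs.drop i).take (j - i)) ++ xs.drop j
          else
            removeMaskAltGo xs m t (j + max 1 t.toNat)
              ((out ++ (xs.drop i).take (j - i))
                 ++ PySem.List.slice xs (some (j : Int)) (some ((j : Int) + m)))
              (hasSent ((out ++ (xs.drop i).take (j - i))
                 ++ PySem.List.slice xs (some (j : Int)) (some ((j : Int) + m))))) := by
  rw [removeMaskAltGo, dif_pos hi, if_neg (by simp [hseen])]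
  split
  · rename_i h; rw [hidx] at h; cases h
  · rename_i j' h
    rw [hidx] at h
    injection h with h'
    subst h'
    rw [PySem.List.slice_natCast]
    dsimp only
    rw [foldl_pvPush, foldl_pvPush]
    by_cases hp : hasSent (out ++ (xs.drop i).take (j - i)) = true
    · rw [if_pos hp, if_pos hp, PySem.List.slice_from_natCast]
    · rw [if_neg hp, if_neg hp]

theorem B_step (xs : List String) (m t : Int) (i j : Nat) (out : List String)
    (hi : i < xs.length)
    (hseen : hasSent out = false) (hidx : idxFrom xs "[MASK]" i = some j)
    (hij : i < j) :
    removeMaskAltGo xs m t i out (hasSent out)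
      = removeMaskAltGo xs m t (i + 1) (out ++ [xs[i]])
          (hasSent (out ++ [xs[i]])) := by
  obtain ⟨hjlen, _, _⟩ := idxFrom_some_spec xs "[MASK]" i j hidx
  have hys : (xs.drop i).take (j - i) = xs[i] :: (xs.drop (i + 1)).take (j - (i + 1)) := by
    rw [List.drop_eq_getElem_cons hi,
        show j - i = (j - (i + 1)) + 1 from by omega, List.take_succ_cons]
  have hidx' : idxFrom xs "[MASK]" (i + 1) = some j := idxFrom_shift xs "[MASK]" i j hidx hij
  rw [B_val_some xs m t i j out hi hseen hidx]
  by_cases hs1 : hasSent (out ++ [xs[i]]) = true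
  · -- the appended token completes the sentinel: both sides copy the rest verbatim
    have hsm : hasSent (out ++ (xs.drop i).take (j - i)) = true := by
      rw [hys, show out ++ xs[i] :: (xs.drop (i + 1)).take (j - (i + 1))
            = (out ++ [xs[i]]) ++ (xs.drop (i + 1)).take (j - (i + 1)) from by simp]
      exact hasSent_mono _ _ hs1
    rw [if_pos hsm, B_val_seen xs m t (i + 1) _ (by omega) hs1]
    rw [hys]
    have hsplit : (xs.drop (i + 1)).take (j - (i + 1)) ++ xs.drop j = xs.drop (i + 1) := by
      have := List.take_append_drop (j - (i + 1)) (xs.drop (i + 1))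
      rw [List.drop_drop, show i + 1 + (j - (i + 1)) = j from by omega] at this
      exact this
    rw [show out ++ xs[i] :: (xs.drop (i + 1)).take (j - (i + 1))
          = (out ++ [xs[i]]) ++ (xs.drop (i + 1)).take (j - (i + 1)) from by simp]
    rw [List.append_assoc, hsplit]
  · have hs1' : hasSent (out ++ [xs[i]]) = false := by
      cases hb : hasSent (out ++ [xs[i]]) with
      | true => exact absurd hb hs1
      | false => rfl
    rw [B_val_some xs m t (i + 1) j (out ++ [xs[i]]) (by omega) hs1' hidx']
    rw [hys]
    rw [show out ++ xs[i] :: (xs.drop (i + 1)).take (j - (i + 1))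
          = (out ++ [xs[i]]) ++ (xs.drop (i + 1)).take (j - (i + 1)) from by simp]

theorem A_copy (xs : List String) (m t : Int) :
    ∀ (fuel i : Nat) (out : List String), xs.length - i + 1 ≤ fuel →
      (hasSent out = true ∨ "[MASK]" ∉ xs.drop i) →
      removeMaskGo m t fuel (out ++ xs.drop i) (out.length : Int) = out ++ xs.drop i := by
  intro fuel
  induction fuel with
  | zero => intro i out hfuel _; omega
  | succ fuel ih =>
    intro i out hfuel hs
    by_cases hi : i < xs.length
    · rw [removeMaskGo]
      rw [if_pos (show (out.length : Int) < ((out ++ xs.drop i).length : Int) by simp; omega)]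
      rw [pyGetD_at out xs i hi, slice_prefix1 out xs i hi]
      have hcnd : ¬ (xs[i] = "[MASK]" ∧ find_sublist (out ++ [xs[i]]) pvSent = -1) := by
        rintro ⟨h1, h2⟩
        have h3 := (cond_iff out xs[i]).mp h2
        rcases hs with hs | hs
        · rw [hasSent_mono out [xs[i]] hs] at h3; cases h3
        · rw [List.drop_eq_getElem_cons hi] at hs
          exact hs (by simp [h1])
      rw [if_neg hcnd]
      have hre : out ++ xs.drop i = (out ++ [xs[i]]) ++ xs.drop (i + 1) := by
        rw [List.drop_eq_getElem_cons hi]; simp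
      rw [hre]
      rw [show (out.length : Int) + 1 = (((out ++ [xs[i]]).length : Nat) : Int) from by simp]
      rw [ih (i + 1) (out ++ [xs[i]]) (by omega)
            (by
              rcases hs with hs | hs
              · exact Or.inl (hasSent_mono out [xs[i]] hs)
              · rw [List.drop_eq_getElem_cons hi] at hs
                exact Or.inr (fun hmem => hs (List.mem_cons_of_mem _ hmem)))]
    · have hnil : xs.drop i = [] := List.drop_eq_nil_of_le (by omega)
      rw [hnil, removeMaskGo]
      rw [if_neg (by simp)]

theorem removeMask_main (xs : List String) (m t : Int)
    (hm : "[MASK]" ∈ xs → 0 ≤ m ∧ m ≤ t ∧ 1 ≤ t) :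
    ∀ (fuel : Nat) (i : Nat) (out : List String), xs.length - i + 1 ≤ fuel →
      removeMaskGo m t fuel (out ++ xs.drop i) (out.length : Int)
        = removeMaskAltGo xs m t i out (hasSent out) := by
  intro fuel
  induction fuel with
  | zero => intro i out hfuel; omega
  | succ fuel ih =>
    intro i out hfuel
    by_cases hi : i < xs.length
    · by_cases hseen : hasSent out = true
      · rw [B_val_seen xs m t i out hi hseen]
        exact A_copy xs m t (fuel + 1) i out hfuel (Or.inl hseen)
      · have hseen' : hasSent out = false := by
          cases hb : hasSent out with
          | true => exact absurd hb hseen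
          | false => rfl
        cases hidx : idxFrom xs "[MASK]" i with
        | none =>
          rw [B_val_none xs m t i out hi hseen' hidx]
          refine A_copy xs m t (fuel + 1) i out hfuel (Or.inr ?_)
          intro hmem
          obtain ⟨k, hk, he⟩ := List.mem_iff_getElem.mp hmem
          have hk' : k < xs.length - i := by simpa using hk
          rw [List.getElem_drop] at he
          exact idxFrom_none_spec xs "[MASK]" i hidx (i + k) (by omega) (by omega) he
        | some j =>
          obtain ⟨hjlen, hjval, hjmin⟩ := idxFrom_some_spec xs "[MASK]" i j hidx
          have hij0 : i ≤ j := idxFrom_ge xs "[MASK]" i j hidx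
          by_cases hij : i < j
          · -- ordinary token before the next mask: both sides advance by one
            rw [B_step xs m t i j out hi hseen' hidx hij]
            rw [removeMaskGo]
            rw [if_pos (show (out.length : Int) < ((out ++ xs.drop i).length : Int) by
                  simp; omega)]
            rw [pyGetD_at out xs i hi, slice_prefix1 out xs i hi]
            rw [if_neg (by
                  rintro ⟨h1, _⟩
                  exact hjmin i hi (le_refl _) hij h1)]
            have hre : out ++ xs.drop i = (out ++ [xs[i]]) ++ xs.drop (i + 1) := by
              rw [List.drop_eq_getElem_cons hi]; simp
            rw [hre]
            rw [show (out.length : Int) + 1 = (((out ++ [xs[i]]).length : Nat) : Int) from by simp]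
            exact ih (i + 1) (out ++ [xs[i]]) (by omega)
          · -- the mask itself
            have hji : j = i := by omega
            subst hji
            have hmask : xs[j] = "[MASK]" := by
              have := hjval; rwa [List.getElem?_eq_getElem hjlen, Option.some_inj] at this
            have hmt : 0 ≤ m ∧ m ≤ t ∧ 1 ≤ t := hm (hmask ▸ List.getElem_mem hjlen)
            rw [B_val_some xs m t j j out hi hseen' hidx]
            simp only [Nat.sub_self, List.take_zero, List.append_nil]
            rw [if_neg (by simp [hseen'])]
            have hB1 : PySem.List.slice xs (some (j : Int)) (some ((j : Int) + m))
                = (xs.drop j).take m.toNat := by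
              rw [show (j : Int) + m = ((j + m.toNat : Nat) : Int) from by omega]
              rw [PySem.List.slice_natCast]
              congr 1
              omega
            rw [hB1]
            rw [removeMaskGo]
            rw [if_pos (show (out.length : Int) < ((out ++ xs.drop j).length : Int) by
                  simp; omega)]
            rw [pyGetD_at out xs j hi, slice_prefix1 out xs j hi]
            have hA : find_sublist (out ++ [xs[j]]) pvSent = -1 := by
              rw [cond_iff, hmask, hasSent_append_mask]; exact hseen'
            rw [if_pos ⟨hmask, hA⟩]
            have hA1 : PySem.List.slice (out ++ xs.drop j) none (some ((out.length : Int) + m))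
                = out ++ (xs.drop j).take m.toNat := by
              rw [show (out.length : Int) + m = ((out.length + m.toNat : Nat) : Int) from by omega]
              rw [PySem.List.slice_to_natCast, List.take_append]
              simp
            have hA2 : PySem.List.slice (out ++ xs.drop j) (some ((out.length : Int) + t)) none
                = xs.drop (j + t.toNat) := by
              rw [show (out.length : Int) + t = ((out.length + t.toNat : Nat) : Int) from by omega]
              rw [PySem.List.slice_from_natCast, List.drop_append]
              simp [List.drop_drop]
            rw [hA1, hA2]
            rw [show j + max 1 t.toNat = j + t.toNat from by omega]
            by_cases hle : m.toNat ≤ xs.length - j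
            · have hlen : (out ++ (xs.drop j).take m.toNat).length = out.length + m.toNat := by
                simp; omega
              rw [show (out.length : Int) + (m - 1) + 1
                    = (((out ++ (xs.drop j).take m.toNat).length : Nat) : Int) from by
                  rw [hlen]; push_cast; omega]
              have := ih (j + t.toNat) (out ++ (xs.drop j).take m.toNat) (by omega)
              exact this
            · -- mask run reaches past the end: both sides stop with the same list
              have htake : (xs.drop j).take m.toNat = xs.drop j := by
                apply List.take_of_length_le; simp; omega
              have hdrop : xs.drop (j + t.toNat) = [] := by
                apply List.drop_eq_nil_of_le; omega
              rw [htake, hdrop]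
              rw [List.append_nil]
              obtain ⟨f, rfl⟩ : ∃ f, fuel = f + 1 := ⟨fuel - 1, by omega⟩
              rw [removeMaskGo]
              rw [if_neg (show ¬ ((out.length : Int) + (m - 1) + 1
                    < ((out ++ xs.drop j).length : Int)) by simp; omega)]
              rw [removeMaskAltGo, dif_neg (by omega)]
    · have hnil : xs.drop i = [] := List.drop_eq_nil_of_le (by omega)
      rw [removeMaskGo, removeMaskAltGo, dif_neg hi, hnil]
      rw [if_neg (by simp)]
      simp

-- ===== VERDICT (by name: the statement is the Claim_ definition above) =====
theorem remove_mask_spec : Claim_equal_remove_mask := by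
  intro line m t _ hpre
  unfold Spec_remove_mask remove_mask remove_mask_alt
  have hm : "[MASK]" ∈ line → 0 ≤ m ∧ m ≤ t ∧ 1 ≤ t := by
    intro hmem; rcases hpre with h | h
    · exact absurd hmem h
    · exact h
  have h0 := removeMask_main line m t hm (line.length + 1) 0 [] (by omega)
  simpa [hasSent] using h0
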